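-- pv_equiv track=rewrite | github.com/proman3419/AGH-WIET-INF-ASD-2021 | others/egz0_20_21/zad1.py | tanagram_2
-- ===== SOURCE A (Python) =====
-- def tanagram_2(x, y, t):
--   n = len(x)
--   used = [0]*n
--
--   for i in range(n):
--     found = False
--     for j in range(i-t, i+t+1):
--       if 0 <= j < n:
--         if x[i] == y[j] and used[j] == 0:
--           found = True
--           used[j] = 1
--           break
--
--     if not found:
--       return False
--
--   return True
-- ===== SOURCE B (Python) =====
-- def tanagram_2(x, y, t):
--     # Per-character queues of y-positions with a monotone head pointer:
--     # the greedy smallest in-window match is found in amortized O(1).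
--     n = len(x)
--     pos = {}
--     for j in range(n):
--         pos.setdefault(y[j], []).append(j)
--     head = {c: 0 for c in pos}
--     for i, c in enumerate(x):
--         q = pos.get(c)
--         if q is None:
--             return False
--         k = head[c]
--         while k < len(q) and q[k] < i - t:
--             k += 1
--         if k == len(q) or q[k] > i + t:
--             return False
--         head[c] = k + 1
--     return True
-- ===== Notes on version B (the rewrite author's own statement) =====
-- stated objective: faster
-- what changed: Replaced A's rescan of the whole window [i-t, i+t] at every position with per-character queues of y-positions consumed by a monotone head pointer, so each greedy smallest-index match costs amortized O(1).
-- outside the precondition, e.g. on tanagram_2('ab', 'b', 0): A returns False, B raises IndexError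
import Mathlib
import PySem

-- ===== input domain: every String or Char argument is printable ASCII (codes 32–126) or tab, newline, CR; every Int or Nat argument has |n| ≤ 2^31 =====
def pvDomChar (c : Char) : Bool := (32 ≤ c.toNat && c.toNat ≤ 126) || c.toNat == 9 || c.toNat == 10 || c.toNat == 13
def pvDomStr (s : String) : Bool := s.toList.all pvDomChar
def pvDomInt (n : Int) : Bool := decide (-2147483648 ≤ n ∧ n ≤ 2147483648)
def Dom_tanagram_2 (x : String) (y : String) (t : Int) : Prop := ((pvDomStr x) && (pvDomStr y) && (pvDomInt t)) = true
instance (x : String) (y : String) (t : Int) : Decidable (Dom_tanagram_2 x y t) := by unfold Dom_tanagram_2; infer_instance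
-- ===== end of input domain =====

-- B replaces A's per-character window rescan with per-character position queues and a
-- monotone head pointer (same greedy smallest-index match, found without rescanning).


-- ===== PORT A =====
-- inner 'for j in range(i-t, i+t+1)' with break: first admissible j, as an Option
def tanagramInner (xs ys : List Char) (n : Int) (used : List Int) (i : Int) : List Int → Option Int
  | [] => none
  | j :: js =>
    if 0 ≤ j ∧ j < n then
      if PySem.List.pyGetD xs i ' ' = PySem.List.pyGetD ys j ' ' ∧ PySem.List.pyGetD used j 0 = 0 then
        some j
      else tanagramInner xs ys n used i js
    else tanagramInner xs ys n used i js

-- outer 'for i in range(n)' carrying the used array; early return False on no match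
def tanagramOuter (xs ys : List Char) (n t : Int) : List Int → List Int → Bool
  | _, [] => true
  | used, i :: is =>
    match tanagramInner xs ys n used i (PySem.List.pyRange (i - t) (i + t + 1) 1) with
    | none => false
    | some j => tanagramOuter xs ys n t (PySem.List.pySetD used j 1) is

def tanagram_2 (x : String) (y : String) (t : Int) : Bool :=
  tanagramOuter x.toList y.toList (x.toList.length : Int) t
    (List.replicate x.toList.length 0) (PySem.List.pyRange 0 (x.toList.length : Int) 1)

-- ===== PORT B =====
-- 'while k < len(q) and q[k] < i - t: k += 1' (fuel = len(q) bounds the iteration count,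
-- making the same computation structurally total)
def altAdvance (q : List Int) (lim : Int) : Nat → Int → Int
  | 0, k => k
  | fuel + 1, k =>
    if k < (q.length : Int) ∧ PySem.List.pyGetD q k 0 < lim then
      altAdvance q lim fuel (k + 1)
    else k

-- 'for i, c in enumerate(x)' carrying the head dict; head[c] is ported as getD c 0,
-- exact here because c is a key of pos (checked by the 'q is None' branch) and every
-- head value starts at 0.
def altLoop (pos : PySem.Dict Char (List Int)) (t : Int) :
    List (Int × Char) → PySem.Dict Char Int → Bool
  | [], _ => true
  | (i, c) :: rest, head =>
    match pos.get? c with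
    | none => false
    | some q =>
      let k := altAdvance q (i - t) q.length (head.getD c 0)
      if k = (q.length : Int) ∨ PySem.List.pyGetD q k 0 > i + t then false
      else altLoop pos t rest (head.insert c (k + 1))

def tanagram_2_alt (x : String) (y : String) (t : Int) : Bool :=
  let xs := x.toList
  let ys := y.toList
  let n : Int := xs.length
  let pos := (PySem.List.pyRange 0 n 1).foldl
      (fun d j => d.modify (PySem.List.pyGetD ys j ' ') [] (· ++ [j])) PySem.Dict.empty
  let head := pos.keys.foldl (fun h c => h.insert c 0) PySem.Dict.empty
  altLoop pos t (PySem.List.enumerate xs 0) head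

-- ===== PRECONDITION & SPEC =====
-- Pre_ excludes inputs with len(y) < len(x): there A raises IndexError as soon as a window
-- scan reaches an index ≥ len(y) (only state-dependent corner cases return False first),
-- and B itself raises IndexError while building its position index.
def Pre_tanagram_2 (x : String) (y : String) (_t : Int) : Prop :=
  x.toList.length ≤ y.toList.length
instance (x : String) (y : String) (t : Int) : Decidable (Pre_tanagram_2 x y t) := by
  unfold Pre_tanagram_2; infer_instance
def pvWitness_tanagram_2 : String × String × Int := ("aba", "ab a", 1)

def Spec_tanagram_2 (x : String) (y : String) (t : Int) (out : Bool) : Prop := out = tanagram_2_alt x y t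
instance (x : String) (y : String) (t : Int) (out : Bool) : Decidable (Spec_tanagram_2 x y t out) := by unfold Spec_tanagram_2; infer_instance

-- ===== CLAIM (what is proved, stated in full; the proofs are below) =====
def Claim_equal_tanagram_2 : Prop := ∀ (x : String) (y : String) (t : Int), Dom_tanagram_2 x y t → Pre_tanagram_2 x y t → Spec_tanagram_2 x y t (tanagram_2 x y t)


-- ===== LEMMAS AND PROOFS =====

-- y[j] as the ports read it
def pvYA (ys : List Char) (j : Int) : Char := PySem.List.pyGetD ys j ' '

-- the (sorted) list of positions j < len(x) with y[j] = c
def pvPos (xs ys : List Char) (c : Char) : List Int :=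
  (PySem.List.pyRange 0 (xs.length : Int) 1).filter (fun j => pvYA ys j == c)

-- used[j] as the ports read it
def pvU (used : List Int) (j : Int) : Int := PySem.List.pyGetD used j 0

-- the position dict built by tanagram_2_alt
def pvD (xs ys : List Char) : PySem.Dict Char (List Int) :=
  (PySem.List.pyRange 0 (xs.length : Int) 1).foldl
    (fun d j => d.modify (PySem.List.pyGetD ys j ' ') [] (· ++ [j])) PySem.Dict.empty

lemma pvD_getD (xs ys : List Char) (c : Char) :
    (pvD xs ys).getD c [] = pvPos xs ys c := by
  unfold pvD pvPos
  have hfm : (PySem.List.pyRange 0 (xs.length : Int) 1).foldl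
        (fun d j => d.modify (PySem.List.pyGetD ys j ' ') [] (· ++ [j])) PySem.Dict.empty
      = ((PySem.List.pyRange 0 (xs.length : Int) 1).map
          (fun j => (PySem.List.pyGetD ys j ' ', j))).foldl
          (fun (d : PySem.Dict Char (List Int)) (p : Char × Int) => d.modify p.1 [] (· ++ [p.2]))
          PySem.Dict.empty := by
    rw [List.foldl_map]
  rw [hfm, PySem.Dict.getD_foldl_modify_append]
  simp [List.filter_map, Function.comp_def, pvYA]

lemma pvD_keys (xs ys : List Char) :
    (pvD xs ys).keys =
      PySem.Set.ofList ((PySem.List.pyRange 0 (xs.length : Int) 1).map (pvYA ys)) := by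
  unfold pvD
  rw [PySem.Dict.keys_foldl_modify_key _ (fun j => PySem.List.pyGetD ys j ' ')
        [] (fun _ j v => v ++ [j])]
  rw [PySem.Dict.keys_empty, PySem.Set.update_nil_left]
  rfl

lemma pvD_get?_none {xs ys : List Char} {c : Char}
    (h : (pvD xs ys).get? c = none) : pvPos xs ys c = [] := by
  rw [PySem.Dict.get?_eq_none_iff_not_mem_keys, pvD_keys, PySem.Set.mem_ofList] at h
  unfold pvPos
  rw [List.filter_eq_nil_iff]
  intro j hj hc
  exact h (List.mem_map.mpr ⟨j, hj, by simpa using hc⟩)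

lemma pvD_get?_some {xs ys : List Char} {c : Char} {q : List Int}
    (h : (pvD xs ys).get? c = some q) : q = pvPos xs ys c := by
  have := PySem.Dict.getD_of_get?_eq_some (pvD xs ys) [] h
  rw [pvD_getD] at this
  exact this.symm

lemma pvRange_pairwise_aux (n : Nat) :
    ∀ a b : Int, (b - a).toNat = n → (PySem.List.pyRange a b 1).Pairwise (· < ·) := by
  induction n with
  | zero =>
    intro a b h
    have : PySem.List.pyRange a b 1 = [] := by
      rw [List.eq_nil_iff_forall_not_mem]
      intro j hj
      have := PySem.List.mem_pyRange_one.mp hj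
      omega
    simp [this]
  | succ n ih =>
    intro a b h
    have hab : a < b := by omega
    rw [PySem.List.pyRange_one_cons hab]
    constructor
    · intro j hj
      have := PySem.List.mem_pyRange_one.mp hj
      omega
    · exact ih (a + 1) b (by omega)

lemma pvRange_pairwise (a b : Int) : (PySem.List.pyRange a b 1).Pairwise (· < ·) :=
  pvRange_pairwise_aux ((b - a).toNat) a b rfl

lemma pvPos_pairwise (xs ys : List Char) (c : Char) :
    (pvPos xs ys c).Pairwise (· < ·) :=
  (pvRange_pairwise 0 (xs.length : Int)).filter _

lemma mem_pvPos {xs ys : List Char} {c : Char} {j : Int} :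
    j ∈ pvPos xs ys c ↔ (0 ≤ j ∧ j < (xs.length : Int)) ∧ pvYA ys j = c := by
  unfold pvPos
  simp [List.mem_filter, PySem.List.mem_pyRange_one]

lemma pvU_replicate (n : Nat) (j : Int) : pvU (List.replicate n 0) j = 0 := by
  unfold pvU
  by_cases h : PySem.Raise.InRange (List.replicate n (0 : Int)).length j
  · exact List.eq_of_mem_replicate (PySem.List.pyGetD_mem (List.replicate n (0 : Int)) 0 h)
  · exact PySem.List.pyGetD_of_none _ _ _ ((PySem.List.pyGet?_eq_none_iff _ _).mpr h)

lemma pvU_set {used : List Int} {j0 j : Int}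
    (h00 : 0 ≤ j0) (_h0l : j0 < (used.length : Int))
    (hj0 : 0 ≤ j) (hjl : j < (used.length : Int)) :
    pvU (PySem.List.pySetD used j0 1) j = if j = j0 then 1 else pvU used j := by
  unfold pvU
  rw [PySem.List.pySetD_of_nonneg used 1 h00]
  have hlen : (used.set j0.toNat 1).length = used.length := by simp
  rw [PySem.List.pyGetD_eq_getElem _ _ hj0 (by rw [hlen]; exact hjl)]
  rw [List.getElem_set]
  by_cases hjj : j = j0
  · simp [hjj]
  · have : ¬ (j0.toNat = j.toNat) := by omega
    rw [if_neg this, if_neg hjj]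
    exact (PySem.List.pyGetD_eq_getElem _ _ hj0 hjl).symm

-- A's inner loop is find-first on the window list
lemma inner_eq_find? (xs ys : List Char) (n : Int) (used : List Int) (i : Int)
    (js : List Int) :
    tanagramInner xs ys n used i js =
      js.find? (fun j => decide ((0 ≤ j ∧ j < n) ∧
        (PySem.List.pyGetD xs i ' ' = PySem.List.pyGetD ys j ' ' ∧
         PySem.List.pyGetD used j 0 = 0))) := by
  induction js with
  | nil => rfl
  | cons j js ih =>
    by_cases h1 : (0 ≤ j ∧ j < n)
    · by_cases h2 : (PySem.List.pyGetD xs i ' ' = PySem.List.pyGetD ys j ' ' ∧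
                     PySem.List.pyGetD used j 0 = 0)
      · simp [tanagramInner, h1, h2]
      · simp [tanagramInner, h1, h2, ih]
    · simp [tanagramInner, h1, ih]

-- on a strictly increasing list, find-first is the minimum satisfying element
lemma find?_min {l : List Int} {p : Int → Bool} (hs : l.Pairwise (· < ·)) {j : Int}
    (h : l.find? p = some j) :
    p j = true ∧ j ∈ l ∧ ∀ j' ∈ l, p j' = true → j ≤ j' := by
  rcases List.find?_eq_some_iff_append.mp h with ⟨hpj, as, bs, rfl, hpre⟩
  refine ⟨hpj, by simp, ?_⟩
  intro j' hj' hpj'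
  rcases List.mem_append.mp hj' with hin | hin
  · exact absurd hpj' (by simpa using hpre j' hin)
  · rcases List.mem_cons.mp hin with heq | hin
    · exact heq.ge
    · have := (List.pairwise_cons.mp (List.pairwise_append.mp hs).2.1).1 j' hin
      omega

-- the while loop: first index ≥ k0 whose entry is not < lim (or the end)
lemma advance_spec (q : List Int) (lim : Int) :
    ∀ (fuel k0 : Nat), q.length ≤ fuel + k0 → k0 ≤ q.length →
    ∃ k : Nat, altAdvance q lim fuel (k0 : Int) = (k : Int) ∧ k0 ≤ k ∧ k ≤ q.length ∧
      (∀ idx : Nat, k0 ≤ idx → idx < k → q.getD idx 0 < lim) ∧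
      (k < q.length → ¬ (q.getD k 0 < lim)) := by
  intro fuel
  induction fuel with
  | zero =>
    intro k0 h1 h2
    exact ⟨k0, rfl, le_refl _, h2, fun idx ha hb => absurd hb (by omega),
      fun hlt => absurd hlt (by omega)⟩
  | succ fuel ih =>
    intro k0 h1 h2
    by_cases hc : ((k0 : Int) < (q.length : Int) ∧ PySem.List.pyGetD q (k0 : Int) 0 < lim)
    · have hk0 : k0 < q.length := by exact_mod_cast hc.1
      rcases ih (k0 + 1) (by omega) (by omega) with ⟨k, hk, hk1, hk2, hk3, hk4⟩
      refine ⟨k, ?_, by omega, hk2, ?_, hk4⟩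
      · have hstep : altAdvance q lim (fuel + 1) (k0 : Int)
            = altAdvance q lim fuel ((k0 : Int) + 1) := by
          simp only [altAdvance]
          rw [if_pos hc]
        rw [hstep, show ((k0 : Int) + 1) = ((k0 + 1 : Nat) : Int) from by push_cast; ring]
        exact hk
      · intro idx ha hb
        by_cases hidx : idx = k0
        · subst hidx
          have := hc.2
          rwa [PySem.List.pyGetD_natCast] at this
        · exact hk3 idx (by omega) hb
    · refine ⟨k0, ?_, le_refl _, h2, fun idx ha hb => absurd hb (by omega), ?_⟩
      · simp only [altAdvance]
        rw [if_neg hc]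
      · intro hlt habs
        exact hc ⟨by exact_mod_cast hlt, by rwa [PySem.List.pyGetD_natCast]⟩

-- the coupling invariant: for every character, B's head pointer splits the position
-- list into a prefix of consumed-or-dead (below the current window) positions and a
-- suffix of positions still unused in A's array
def pvInv (xs ys : List Char) (t : Int) (used : List Int)
    (head : PySem.Dict Char Int) (m : Int) : Prop :=
  ∀ c : Char, ∃ k0 : Nat, k0 ≤ (pvPos xs ys c).length ∧ head.getD c 0 = (k0 : Int) ∧
    (∀ j ∈ (pvPos xs ys c).take k0, pvU used j = 1 ∨ j < m - t) ∧
    (∀ j ∈ (pvPos xs ys c).drop k0, pvU used j = 0)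

lemma loop_eq (xs ys : List Char) (t : Int) :
    ∀ (k m : Nat) (used : List Int) (head : PySem.Dict Char Int),
    m + k = xs.length → used.length = xs.length →
    pvInv xs ys t used head (m : Int) →
    tanagramOuter xs ys (xs.length : Int) t used
        (PySem.List.pyRange (m : Int) (xs.length : Int) 1)
      = altLoop (pvD xs ys) t (PySem.List.enumerate (xs.drop m) (m : Int)) head := by
  intro k
  induction k with
  | zero =>
    intro m used head hmk hlen hinv
    have hm : m = xs.length := by omega
    have hr : PySem.List.pyRange (m : Int) (xs.length : Int) 1 = [] := by
      rw [List.eq_nil_iff_forall_not_mem]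
      intro j hj
      have := PySem.List.mem_pyRange_one.mp hj
      omega
    have hd : xs.drop m = [] := by rw [hm, List.drop_length]
    rw [hr, hd]
    rfl
  | succ k ih =>
    intro m used head hmk hlen hinv
    have hm : m < xs.length := by omega
    rw [PySem.List.pyRange_one_cons (by exact_mod_cast hm)]
    rw [List.drop_eq_getElem_cons hm, PySem.List.enumerate_cons]
    have hxm : PySem.List.pyGetD xs (m : Int) ' ' = xs[m] := by
      rw [PySem.List.pyGetD_eq_getElem _ _ (by positivity) (by exact_mod_cast hm)]
      simp
    set c : Char := xs[m] with hc
    set q : List Int := pvPos xs ys c with hqdef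
    have hqpw : q.Pairwise (· < ·) := pvPos_pairwise xs ys c
    rcases hinv c with ⟨k0, hk0len, hhead, hdone, hrest⟩
    -- the admissibility predicate of A's inner scan, in terms of pvPos membership
    have adm_iff : ∀ j : Int,
        ((0 ≤ j ∧ j < (xs.length : Int)) ∧
          (PySem.List.pyGetD xs (m : Int) ' ' = PySem.List.pyGetD ys j ' ' ∧
           PySem.List.pyGetD used j 0 = 0))
        ↔ (j ∈ q ∧ pvU used j = 0) := by
      intro j
      rw [hqdef, mem_pvPos]
      unfold pvU pvYA
      constructor
      · rintro ⟨hb, he, hu⟩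
        exact ⟨⟨hb, by rw [← he, hxm]⟩, hu⟩
      · rintro ⟨⟨hb, he⟩, hu⟩
        exact ⟨hb, by rw [he, hxm], hu⟩
    -- positions in the prefix/suffix of q, by index
    have q_idx_mem : ∀ (idx : Nat) (h : idx < q.length), q[idx] ∈ q := fun idx h => List.getElem_mem h
    have prefix_dead : ∀ (idx : Nat) (h : idx < q.length), idx < k0 →
        pvU used q[idx] = 1 ∨ q[idx] < (m : Int) - t := by
      intro idx h hidx
      apply hdone
      rw [List.mem_take_iff_getElem]
      exact ⟨idx, by omega, rfl⟩
    have suffix_unused : ∀ (idx : Nat) (h : idx < q.length), k0 ≤ idx →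
        pvU used q[idx] = 0 := by
      intro idx h hidx
      apply hrest
      have hlt : idx - k0 < (q.drop k0).length := by
        rw [List.length_drop]; omega
      have : (q.drop k0)[idx - k0] = q[idx] := by
        rw [List.getElem_drop]
        congr 1
        omega
      rw [← this]
      exact List.getElem_mem hlt
    cases hgc : (pvD xs ys).get? c with
    | none =>
      -- character absent from y[:n]: q = [] and the window scan finds nothing
      have hqnil : q = [] := by rw [hqdef]; exact pvD_get?_none hgc
      have hnone : tanagramInner xs ys (xs.length : Int) used (m : Int)
          (PySem.List.pyRange ((m : Int) - t) ((m : Int) + t + 1) 1) = none := by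
        rw [inner_eq_find?, List.find?_eq_none]
        intro j hj hp
        have := (adm_iff j).mp (by simpa using hp)
        rw [hqnil] at this
        exact absurd this.1 (List.not_mem_nil)
      simp only [tanagramOuter, altLoop, hgc, hnone]
    | some q' =>
      have hq' : q' = q := by rw [hqdef]; exact pvD_get?_some hgc
      subst hq'
      rcases advance_spec q ((m : Int) - t) q.length k0 (by omega) hk0len with
        ⟨k1, hadv, hk1ge, hk1le, hskip, hstop⟩
      -- `no match` argument shared by the two failure branches
      have no_match_of : (k1 = q.length ∨ ((m : Int) + t < q.getD k1 0 ∧ k1 < q.length)) →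
          tanagramInner xs ys (xs.length : Int) used (m : Int)
            (PySem.List.pyRange ((m : Int) - t) ((m : Int) + t + 1) 1) = none := by
        intro hcase
        rw [inner_eq_find?, List.find?_eq_none]
        intro j hj hp
        have hjw := PySem.List.mem_pyRange_one.mp hj
        have hadm := (adm_iff j).mp (by simpa using hp)
        rcases List.mem_iff_getElem.mp hadm.1 with ⟨idx, hidxlt, hidxeq⟩
        by_cases hidx0 : idx < k0
        · rcases prefix_dead idx hidxlt hidx0 with h1 | h1
          · rw [hidxeq] at h1; rw [hadm.2] at h1; omega
          · rw [hidxeq] at h1; omega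
        · by_cases hidx1 : idx < k1
          · have := hskip idx (by omega) hidx1
            rw [List.getD_eq_getElem q 0 hidxlt, hidxeq] at this
            omega
          · rcases hcase with hcase | hcase
            · omega
            · have hk1lt : k1 < q.length := hcase.2
              have : q.getD k1 0 ≤ j := by
                rw [List.getD_eq_getElem q 0 hk1lt, ← hidxeq]
                by_cases he : idx = k1
                · subst he; omega
                · have := (List.pairwise_iff_getElem.mp hqpw) k1 idx hk1lt hidxlt (by omega)
                  omega
              omega
      by_cases hend : k1 = q.length
      · -- B: k == len(q) → False; A finds nothing either
        have hnone := no_match_of (Or.inl hend)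
        simp only [tanagramOuter, altLoop, hgc, hhead, hadv, hnone]
        rw [if_pos (Or.inl (by exact_mod_cast hend))]
      · have hk1lt : k1 < q.length := by omega
        have hj0ge : ¬ (q.getD k1 0 < (m : Int) - t) := hstop hk1lt
        have hgetd : PySem.List.pyGetD q (k1 : Int) 0 = q.getD k1 0 :=
          PySem.List.pyGetD_natCast q k1 0
        by_cases hover : (m : Int) + t < q.getD k1 0
        · -- B: q[k] > i + t → False; A finds nothing either
          have hnone := no_match_of (Or.inr ⟨hover, hk1lt⟩)
          simp only [tanagramOuter, altLoop, hgc, hhead, hadv, hnone]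
          rw [if_pos (Or.inr (by rw [hgetd]; exact hover))]
        · -- match: both take y-position j0 = q[k1]
          set j0 : Int := q.getD k1 0 with hj0def
          have hj0elem : q[k1] = j0 := by rw [hj0def, List.getD_eq_getElem q 0 hk1lt]
          have hj0mem : j0 ∈ q := by rw [← hj0elem]; exact List.getElem_mem hk1lt
          have hj0unused : pvU used j0 = 0 := by
            rw [← hj0elem]; exact suffix_unused k1 hk1lt hk1ge
          have hj0bounds := (mem_pvPos.mp (hqdef ▸ hj0mem)).1
          have hsome : tanagramInner xs ys (xs.length : Int) used (m : Int)
              (PySem.List.pyRange ((m : Int) - t) ((m : Int) + t + 1) 1) = some j0 := by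
            rw [inner_eq_find?]
            cases hf : List.find? _ _ with
            | none =>
              rw [List.find?_eq_none] at hf
              exact absurd (by
                  simp only [decide_eq_true_eq]
                  exact (adm_iff j0).mpr ⟨hj0mem, hj0unused⟩)
                (hf j0 (PySem.List.mem_pyRange_one.mpr ⟨by omega, by omega⟩))
            | some j1 =>
              rcases find?_min (pvRange_pairwise _ _) hf with ⟨hpj1, hj1mem, hj1min⟩
              have hadm1 := (adm_iff j1).mp (by simpa using hpj1)
              have hj1w := PySem.List.mem_pyRange_one.mp hj1mem
              -- j0 ≤ j1 : every admissible in-window position sits at index ≥ k1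
              have h01 : j0 ≤ j1 := by
                rcases List.mem_iff_getElem.mp hadm1.1 with ⟨idx, hidxlt, hidxeq⟩
                by_cases hidx0 : idx < k0
                · rcases prefix_dead idx hidxlt hidx0 with h1 | h1
                  · rw [hidxeq, hadm1.2] at h1; omega
                  · rw [hidxeq] at h1; omega
                · by_cases hidx1 : idx < k1
                  · have := hskip idx (by omega) hidx1
                    rw [List.getD_eq_getElem q 0 hidxlt, hidxeq] at this
                    omega
                  · by_cases he : idx = k1
                    · subst he; rw [← hidxeq, hj0elem]
                    · have := (List.pairwise_iff_getElem.mp hqpw) k1 idx hk1lt hidxlt (by omega)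
                      rw [hidxeq, hj0elem] at this
                      omega
              have h10 : j1 ≤ j0 := hj1min j0
                (PySem.List.mem_pyRange_one.mpr ⟨by omega, by omega⟩)
                (by simp only [decide_eq_true_eq]
                    exact (adm_iff j0).mpr ⟨hj0mem, hj0unused⟩)
              rw [le_antisymm h10 h01]
          -- both sides step; apply the induction hypothesis at m + 1
          simp only [tanagramOuter, altLoop, hgc, hhead, hadv, hsome]
          rw [if_neg (by push Not; exact ⟨by exact_mod_cast hend, by rw [hgetd]; omega⟩)]
          have harg1 : ((m : Int) + 1) = ((m + 1 : Nat) : Int) := by push_cast; ring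
          rw [harg1]
          apply ih (m + 1) (PySem.List.pySetD used j0 1) (head.insert c ((k1 : Int) + 1))
            (by omega) (by rw [PySem.List.length_pySetD]; exact hlen)
          -- re-establish the invariant
          intro c'
          have hUset : ∀ j : Int, 0 ≤ j → j < (xs.length : Int) →
              pvU (PySem.List.pySetD used j0 1) j = if j = j0 then 1 else pvU used j := by
            intro j hj1 hj2
            exact pvU_set hj0bounds.1 (by rw [hlen]; exact hj0bounds.2) hj1
              (by rw [hlen]; exact hj2)
          by_cases hcc : c' = c
          · subst hcc
            refine ⟨k1 + 1, by rw [← hqdef]; omega, ?_, ?_, ?_⟩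
            · rw [PySem.Dict.getD_insert_self]; push_cast; ring
            · intro j hj
              rw [← hqdef] at hj
              rcases List.mem_take_iff_getElem.mp hj with ⟨idx, hidxk, hidxeq⟩
              have hidxlt : idx < q.length := by omega
              have hidxk' : idx < k1 + 1 := by omega
              have hjq : j ∈ q := by rw [← hidxeq]; exact List.getElem_mem hidxlt
              have hjb := (mem_pvPos.mp (hqdef ▸ hjq)).1
              rw [hUset j (by omega) (by omega)]
              by_cases hidx0 : idx < k0
              · rcases prefix_dead idx hidxlt hidx0 with h1 | h1
                · left; rw [← hidxeq]; rw [h1]; split <;> rfl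
                · right; rw [← hidxeq]; push_cast; omega
              · by_cases hidx1 : idx < k1
                · have := hskip idx (by omega) hidx1
                  rw [List.getD_eq_getElem q 0 hidxlt] at this
                  right; rw [← hidxeq]; push_cast; omega
                · have he : idx = k1 := by omega
                  subst he
                  left
                  rw [← hidxeq, hj0elem, if_pos rfl]
            · intro j hj
              rw [← hqdef] at hj
              rcases List.mem_iff_getElem.mp (List.mem_of_mem_drop hj) with ⟨idx, hidxlt, hidxeq⟩
              rcases List.mem_iff_getElem.mp hj with ⟨idd, hiddlt, hiddeq⟩
              have hiddlen : (k1 + 1) + idd < q.length := by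
                have := hiddlt; rw [List.length_drop] at this; omega
              have hjidx : q[(k1 + 1) + idd] = j := by
                rw [← hiddeq, List.getElem_drop]
              have hjne : j ≠ j0 := by
                have := (List.pairwise_iff_getElem.mp hqpw) k1 ((k1 + 1) + idd)
                  hk1lt hiddlen (by omega)
                rw [hjidx, hj0elem] at this
                omega
              have hjq : j ∈ q := by rw [← hjidx]; exact List.getElem_mem hiddlen
              have hjb := (mem_pvPos.mp (hqdef ▸ hjq)).1
              rw [hUset j (by omega) (by omega), if_neg hjne]
              rw [← hjidx]
              exact suffix_unused _ hiddlen (by omega)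
          · rcases hinv c' with ⟨k0', hk0'len, hhead', hdone', hrest'⟩
            have hchar : ∀ j ∈ pvPos xs ys c', j ≠ j0 := by
              intro j hj
              have h1 := (mem_pvPos.mp hj).2
              have h2 := (mem_pvPos.mp (hqdef ▸ hj0mem)).2
              intro habs
              rw [habs, h2] at h1
              exact hcc h1.symm
            refine ⟨k0', hk0'len, ?_, ?_, ?_⟩
            · rw [PySem.Dict.getD_insert_of_ne _ _ _ hcc]; exact hhead'
            · intro j hj
              have hjb := (mem_pvPos.mp (List.mem_of_mem_take hj)).1
              rw [hUset j (by omega) (by omega),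
                  if_neg (hchar j (List.mem_of_mem_take hj))]
              rcases hdone' j hj with h1 | h1
              · left; exact h1
              · right; push_cast; omega
            · intro j hj
              have hjb := (mem_pvPos.mp (List.mem_of_mem_drop hj)).1
              rw [hUset j (by omega) (by omega),
                  if_neg (hchar j (List.mem_of_mem_drop hj))]
              exact hrest' j hj

lemma head_init_getD (l : List Char) :
    ∀ (d : PySem.Dict Char Int), (∀ c, d.getD c 0 = 0) →
    ∀ c, (l.foldl (fun h c => h.insert c 0) d).getD c 0 = 0 := by
  induction l with
  | nil => intro d hd c; exact hd c
  | cons a l ih =>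
    intro d hd c
    apply ih
    intro c'
    rw [PySem.Dict.getD_insert]
    split <;> [rfl; exact hd c']

-- ===== VERDICT (by name: the statement is the Claim_ definition above) =====
theorem tanagram_2_spec : Claim_equal_tanagram_2 := by
  intro x y t _hdom _hpre
  unfold Spec_tanagram_2 tanagram_2 tanagram_2_alt
  simp only []
  have hinit : pvInv x.toList y.toList t (List.replicate x.toList.length 0)
      ((pvD x.toList y.toList).keys.foldl (fun h c => h.insert c 0) PySem.Dict.empty)
      ((0 : Nat) : Int) := by
    intro c
    refine ⟨0, by omega, ?_, ?_, ?_⟩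
    · rw [head_init_getD _ PySem.Dict.empty (fun c' => PySem.Dict.getD_empty c' 0) c]; rfl
    · intro j hj; simp at hj
    · intro j _; exact pvU_replicate _ j
  have := loop_eq x.toList y.toList t x.toList.length 0
    (List.replicate x.toList.length 0)
    ((pvD x.toList y.toList).keys.foldl (fun h c => h.insert c 0) PySem.Dict.empty)
    (by omega) (by simp) hinit
  simpa [pvD, List.drop_zero] using this
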